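-- pv_equiv track=rewrite | github.com/albertoHdzE/CausalBool | src/complexity/Trajectory_LZ.py | compute_lz76
-- ===== SOURCE A (Python) =====
-- def compute_lz76(s):
--     """
--     Calculate LZ76 complexity of a binary string s.
--
--     Ref: Kaspar, F., & Schuster, H. G. (1987).
--     Easily calculable measure for the complexity of spatiotemporal patterns.
--     Physical Review A, 36(2), 842.
--     """
--     if not s:
--         return 0
--
--     n = len(s)
--     i = 0
--     c = 1
--     k = 1
--     k_max = 1
--
--     while True:
--         if i + k > n:
--             break
--
--         sub = s[i : i+k]
--         # Search space: history S[0 : i+k-1]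
--         # This means we look for sub in the string that ends just before the last char of sub
--         search_space = s[0 : i+k-1]
--
--         if sub in search_space:
--             k += 1
--         else:
--             c += 1
--             i += k
--             k = 1
--
--     return c
-- ===== SOURCE B (Python) =====
-- def compute_lz76(s):
--     """LZ76 complexity: direct longest-previous-match factorization (no substring search)."""
--     if not s:
--         return 0
--     n = len(s)
--     i = 0
--     c = 1
--     while i < n:
--         # longest m with s[j:j+m] == s[i:i+m] for some j < i (overlap allowed)
--         best = 0
--         for j in range(i):
--             m = 0
--             while i + m < n and s[j + m] == s[i + m]:
--                 m += 1
--             if m > best: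
--                 best = m
--         if i + best >= n:
--             break
--         c += 1
--         i += best + 1
--     return c
-- ===== Notes on version B (the rewrite author's own statement) =====
-- stated objective: alternative
-- what changed: A grows each phrase one character at a time and re-runs a substring search of the growing prefix in the history at every step; B computes each phrase's length directly as the maximum longest-common-prefix match against all earlier start positions, with no substring search and no incremental k loop.
import Mathlib
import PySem

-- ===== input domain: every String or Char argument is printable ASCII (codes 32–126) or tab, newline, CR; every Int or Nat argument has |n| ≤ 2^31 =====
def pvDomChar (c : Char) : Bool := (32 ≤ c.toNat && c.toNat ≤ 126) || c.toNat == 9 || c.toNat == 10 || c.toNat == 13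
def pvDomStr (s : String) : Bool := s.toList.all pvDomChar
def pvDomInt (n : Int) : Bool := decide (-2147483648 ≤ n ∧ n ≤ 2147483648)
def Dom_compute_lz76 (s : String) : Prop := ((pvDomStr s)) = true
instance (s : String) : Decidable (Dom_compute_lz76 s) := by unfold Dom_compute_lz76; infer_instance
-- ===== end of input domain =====

-- B replaces A's grow-and-substring-search phrase scan by a direct longest-previous-match
-- computation per phrase (alternative decomposition; not claimed faster).

-- ===== PORT A =====
-- A's while-True loop over state (i, c, k); terminates because i + k strictly increases.
-- s[i:i+k] = (cs.drop i).take k and s[0:i+k-1] = cs.take (i+k-1) by PySem.List.slice_natCast_add /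
-- slice_to_natCast (bounds are natural numbers: i ≥ 0, k ≥ 1); 'sub in search_space' is PySem.Chars.isIn.
def lzA_go (cs : List Char) (n i c k : Nat) : Int :=
  if h : i + k > n then (c : Int)
  else
    let sub := (cs.drop i).take k
    let search := cs.take (i + k - 1)
    if PySem.Chars.isIn sub search then lzA_go cs n i c (k + 1)
    else lzA_go cs n (i + k) (c + 1) 1
termination_by n + 1 - (i + k)
decreasing_by all_goals omega

def compute_lz76 (s : String) : Int :=
  if s.toList = [] then 0
  else lzA_go s.toList s.toList.length 0 1 1

-- ===== PORT B =====
-- Source B's inner 'while i+m < n and s[j+m] == s[i+m]: m += 1' computed from position j, i: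
-- it is the longest common prefix of cs.drop j and cs.drop i (the i+m < n stop is the
-- end of the shorter list cs.drop i, since j < i).
def lzLcp : List Char → List Char → Nat
  | a :: as, b :: bs => if a = b then lzLcp as bs + 1 else 0
  | _, _ => 0

-- Source B's 'for j in range(i): … if m > best: best = m'
def bestMatch (cs : List Char) (i : Nat) : Nat :=
  (List.range i).foldl
    (fun best j =>
      let m := lzLcp (cs.drop j) (cs.drop i)
      if m > best then m else best) 0

-- Source B's outer 'while i < n' loop over state (i, c)
def lzB_go (cs : List Char) (n i c : Nat) : Int :=
  if h : i < n then
    let best := bestMatch cs i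
    if i + best ≥ n then (c : Int)
    else lzB_go cs n (i + best + 1) (c + 1)
  else (c : Int)
termination_by n - i
decreasing_by omega

def compute_lz76_alt (s : String) : Int :=
  if s.toList = [] then 0
  else lzB_go s.toList s.toList.length 0 1

-- ===== PRECONDITION & SPEC =====
def Spec_compute_lz76 (s : String) (out : Int) : Prop := out = compute_lz76_alt s
instance (s : String) (out : Int) : Decidable (Spec_compute_lz76 s out) := by unfold Spec_compute_lz76; infer_instance

-- ===== CLAIM (what is proved, stated in full; the proofs are below) =====
def Claim_equal_compute_lz76 : Prop := ∀ (s : String), Dom_compute_lz76 s → Spec_compute_lz76 s (compute_lz76 s)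

-- ===== LEMMAS AND PROOFS =====

theorem lzLcp_le_right (a b : List Char) : lzLcp a b ≤ b.length := by
  induction a generalizing b with
  | nil => simp [lzLcp]
  | cons x as ih =>
    cases b with
    | nil => simp [lzLcp]
    | cons y bs =>
      by_cases h : x = y <;> simp [lzLcp, h]
      exact ih bs

theorem take_eq_take_iff_le_lzLcp (k : Nat) (a b : List Char)
    (ha : k ≤ a.length) (hb : k ≤ b.length) :
    a.take k = b.take k ↔ k ≤ lzLcp a b := by
  induction k generalizing a b with
  | zero => simp
  | succ k ih =>
    cases a with
    | nil => simp at ha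
    | cons x as =>
      cases b with
      | nil => simp at hb
      | cons y bs =>
        simp only [List.take_succ_cons, List.cons.injEq, lzLcp]
        by_cases h : x = y
        · simp only [h, if_true, true_and]
          rw [ih as bs (by simpa using ha) (by simpa using hb)]
          omega
        · simp [h]

theorem le_bestMatch_iff (cs : List Char) (i k : Nat) (hk : 1 ≤ k) :
    k ≤ bestMatch cs i ↔ ∃ j < i, k ≤ lzLcp (cs.drop j) (cs.drop i) := by
  unfold bestMatch
  have key : ∀ (l : List Nat) (a : Nat),
      k ≤ l.foldl (fun best j => let m := lzLcp (cs.drop j) (cs.drop i);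
        if m > best then m else best) a
      ↔ k ≤ a ∨ ∃ j ∈ l, k ≤ lzLcp (cs.drop j) (cs.drop i) := by
    intro l
    induction l with
    | nil => simp
    | cons x xs ih =>
      intro a
      simp only [List.foldl_cons, ih, List.mem_cons]
      constructor
      · rintro (h | h)
        · by_cases hx : lzLcp (cs.drop x) (cs.drop i) > a
          · simp only [hx, if_pos] at h
            exact Or.inr ⟨x, Or.inl rfl, h⟩
          · simp only [hx] at h
            exact Or.inl h
        · obtain ⟨j, hj, hle⟩ := h
          exact Or.inr ⟨j, Or.inr hj, hle⟩
      · rintro (h | ⟨j, hj | hj, hle⟩)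
        · left; split <;> omega
        · subst hj; left; split <;> omega
        · exact Or.inr ⟨j, hj, hle⟩
  rw [key]
  simp only [List.mem_range]
  have hk0 : ¬ k ≤ 0 := by omega
  simp only [hk0, false_or]

theorem bestMatch_le (cs : List Char) (i : Nat) : bestMatch cs i ≤ cs.length - i := by
  by_contra h
  have h1 : cs.length - i + 1 ≤ bestMatch cs i := by omega
  rw [le_bestMatch_iff cs i _ (by omega)] at h1
  obtain ⟨j, _, hle⟩ := h1
  have := lzLcp_le_right (cs.drop j) (cs.drop i)
  simp only [List.length_drop] at this
  omega

theorem isIn_iff_lzLcp (cs : List Char) (i k : Nat) (hk : 1 ≤ k) (hik : i + k ≤ cs.length) :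
    PySem.Chars.isIn ((cs.drop i).take k) (cs.take (i + k - 1)) = true
      ↔ ∃ j < i, k ≤ lzLcp (cs.drop j) (cs.drop i) := by
  rw [← PySem.Chars.exists_prefix_drop_iff_isIn]
  have hsublen : ((cs.drop i).take k).length = k := by
    simp only [List.length_take, List.length_drop]; omega
  constructor
  · rintro ⟨j, hpre⟩
    rw [List.drop_take, List.prefix_take_iff, hsublen] at hpre
    obtain ⟨hpre, hlen⟩ := hpre
    have hj : j < i := by omega
    refine ⟨j, hj, ?_⟩
    rw [List.prefix_iff_eq_take, hsublen] at hpre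
    rw [← take_eq_take_iff_le_lzLcp k _ _ (by simp; omega) (by simp; omega)]
    exact hpre.symm
  · rintro ⟨j, hj, hle⟩
    refine ⟨j, ?_⟩
    rw [List.drop_take, List.prefix_take_iff, hsublen]
    constructor
    · rw [List.prefix_iff_eq_take, hsublen]
      exact ((take_eq_take_iff_le_lzLcp k _ _ (by simp; omega) (by simp; omega)).mpr hle).symm
    · omega

-- one phrase of A's scan equals one step of B's loop
theorem lzA_phase (cs : List Char) (i c : Nat) (hi : i ≤ cs.length) :
    ∀ d k, 1 ≤ k → k ≤ bestMatch cs i + 1 → bestMatch cs i + 1 - k = d →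
    lzA_go cs cs.length i c k =
      (if cs.length ≤ i + bestMatch cs i then (c : Int)
       else lzA_go cs cs.length (i + bestMatch cs i + 1) (c + 1) 1) := by
  intro d
  induction d with
  | zero =>
    intro k hk1 hkL hd
    have hkeq : k = bestMatch cs i + 1 := by omega
    subst hkeq
    rw [lzA_go]
    by_cases hin : i + (bestMatch cs i + 1) > cs.length
    · rw [dif_pos hin]
      have hend : cs.length ≤ i + bestMatch cs i := by omega
      rw [if_pos hend]
    · rw [dif_neg hin]
      have hmem : ¬ PySem.Chars.isIn ((cs.drop i).take (bestMatch cs i + 1))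
          (cs.take (i + (bestMatch cs i + 1) - 1)) = true := by
        rw [isIn_iff_lzLcp cs i (bestMatch cs i + 1) (by omega) (by omega)]
        rintro ⟨j, hj, hle⟩
        have : bestMatch cs i + 1 ≤ bestMatch cs i := by
          rw [le_bestMatch_iff cs i _ (by omega)]; exact ⟨j, hj, hle⟩
        omega
      have hend : ¬ cs.length ≤ i + bestMatch cs i := by omega
      rw [if_neg hmem, if_neg hend]
      have harith : i + (bestMatch cs i + 1) = i + bestMatch cs i + 1 := by omega
      rw [harith]
  | succ d ih =>
    intro k hk1 hkL hd
    have hkL' : k ≤ bestMatch cs i := by omega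
    have hin : i + k ≤ cs.length := by
      have := bestMatch_le cs i; omega
    have hmem : PySem.Chars.isIn ((cs.drop i).take k) (cs.take (i + k - 1)) = true := by
      rw [isIn_iff_lzLcp cs i k hk1 hin]
      rw [← le_bestMatch_iff cs i k hk1]
      exact hkL'
    rw [lzA_go]
    have hgt : ¬ i + k > cs.length := by omega
    rw [dif_neg hgt]
    simp only [hmem, if_pos]
    exact ih (k + 1) (by omega) (by omega) (by omega)

theorem lzA_eq_lzB (cs : List Char) : ∀ d i c, cs.length - i = d → i ≤ cs.length →
    lzA_go cs cs.length i c 1 = lzB_go cs cs.length i c := by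
  intro d
  induction d using Nat.strong_induction_on with
  | _ d ih =>
    intro i c hd hi
    rw [lzA_phase cs i c hi (bestMatch cs i) 1 (by omega) (by omega) (by omega)]
    rw [lzB_go]
    by_cases hlt : i < cs.length
    · rw [dif_pos hlt]
      by_cases hend : cs.length ≤ i + bestMatch cs i
      · rw [if_pos hend]
        have : i + bestMatch cs i ≥ cs.length := by omega
        simp only [this, if_pos]
      · rw [if_neg hend]
        have hnend : ¬ i + bestMatch cs i ≥ cs.length := by omega
        simp only [hnend]
        exact ih (cs.length - (i + bestMatch cs i + 1)) (by omega) _ _ rfl (by omega)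
    · rw [dif_neg hlt]
      have hend : cs.length ≤ i + bestMatch cs i := by omega
      rw [if_pos hend]

-- ===== VERDICT (by name: the statement is the Claim_ definition above) =====
theorem compute_lz76_spec : Claim_equal_compute_lz76 := by
  intro s _
  unfold Spec_compute_lz76 compute_lz76 compute_lz76_alt
  by_cases h : s.toList = []
  · simp [h]
  · simp only [h]
    exact lzA_eq_lzB s.toList (s.toList.length - 0) 0 1 rfl (by omega)
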